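-- pv_equiv track=rewrite | github.com/samtxy/Compiler-Customized-Language | Compiler-Customized-Language/lexer.py | identifierFsm
-- ===== SOURCE A (Python) =====
-- def identifierFsm(id_str):
--     FSM = [[1, 4, 5], [2, 3, 5], [2, 3, 5],
--            [2, 3, 5], [4, 4, 5], [5, 5, 5]]
--     state = 0
--     length_str = len(id_str)
--
--     # get every ascii value of string and put into array
--     ascii_values = [ord(character) for character in id_str]
--     for i in range(length_str):
--
--         # check if the current ascii value is an identifier
--         char_check = ascii_values[i]
--
--         if char_check >= 65 and char_check <= 90 or char_check >= 95 and char_check <= 122: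
--             state = FSM[state][0]
--
--         elif char_check >= 48 and char_check <= 57:
--             state = FSM[state][1]
--
--         else:
--             state = FSM[state][2]
--
--     if state == 1 or state == 2 or state == 3:
--         return 1
--
--     else:
--         return 0
-- ===== SOURCE B (Python) =====
-- def identifierFsm(id_str):
--     if not id_str:
--         return 0
--     o = ord(id_str[0])
--     if not (65 <= o <= 90 or 95 <= o <= 122):
--         return 0
--     for c in id_str[1:]:
--         o = ord(c)
--         if not (65 <= o <= 90 or 95 <= o <= 122 or 48 <= o <= 57):
--             return 0
--     return 1
-- ===== Notes on version B (the rewrite author's own statement) =====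
-- stated objective: simpler
-- what changed: Replaced the 6-state FSM transition table and ascii-array index loop by a direct check of the identifier rule (first char letter/underscore, rest letter/underscore/digit) with early exit on the first bad character; no ascii list or table lookups.
import Mathlib
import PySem

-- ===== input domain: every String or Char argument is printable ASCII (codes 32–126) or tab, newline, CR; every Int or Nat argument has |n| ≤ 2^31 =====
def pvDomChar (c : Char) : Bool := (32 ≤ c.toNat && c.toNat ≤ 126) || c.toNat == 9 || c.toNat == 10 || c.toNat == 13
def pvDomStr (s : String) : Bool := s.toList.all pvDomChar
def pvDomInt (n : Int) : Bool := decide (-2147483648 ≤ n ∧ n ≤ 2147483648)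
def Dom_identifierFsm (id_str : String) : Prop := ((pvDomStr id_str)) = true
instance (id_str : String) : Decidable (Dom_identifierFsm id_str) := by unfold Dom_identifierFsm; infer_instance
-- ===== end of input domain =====

-- B replaces A's 6-state FSM table and index loop by a direct check of the identifier
-- rule (first char letter/underscore, rest letter/underscore/digit), with early exit.

-- ===== PORT A =====
def pvFSM : List (List Int) :=
  [[1, 4, 5], [2, 3, 5], [2, 3, 5], [2, 3, 5], [4, 4, 5], [5, 5, 5]]

-- the loop body of A: one FSM transition on ascii value `ch` from `state`
def pvStep (state : Int) (ch : Int) : Int :=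
  if (65 ≤ ch ∧ ch ≤ 90) ∨ (95 ≤ ch ∧ ch ≤ 122) then
    PySem.List.pyGetD (PySem.List.pyGetD pvFSM state []) 0 0
  else if 48 ≤ ch ∧ ch ≤ 57 then
    PySem.List.pyGetD (PySem.List.pyGetD pvFSM state []) 1 0
  else
    PySem.List.pyGetD (PySem.List.pyGetD pvFSM state []) 2 0

def identifierFsm (id_str : String) : Int :=
  let lengthStr : Int := (id_str.toList.length : Int)
  let asciiValues : List Int := id_str.toList.map (fun c => (c.toNat : Int))
  let state : Int :=
    (PySem.List.pyRange 0 lengthStr 1).foldl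
      (fun state i => pvStep state (PySem.List.pyGetD asciiValues i 0)) 0
  if state = 1 ∨ state = 2 ∨ state = 3 then 1 else 0

-- ===== PORT B =====
def pvIsLetter (o : Int) : Bool := decide ((65 ≤ o ∧ o ≤ 90) ∨ (95 ≤ o ∧ o ≤ 122))

def pvIsWord (o : Int) : Bool := pvIsLetter o || decide (48 ≤ o ∧ o ≤ 57)

-- the early-exit loop over the tail of the string
def pvRest : List Char → Int
  | [] => 1
  | c :: cs => if pvIsWord (c.toNat : Int) then pvRest cs else 0

def identifierFsm_alt (id_str : String) : Int :=
  match id_str.toList with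
  | [] => 0
  | c :: cs => if pvIsLetter (c.toNat : Int) then pvRest cs else 0

-- ===== PRECONDITION & SPEC =====
def Spec_identifierFsm (id_str : String) (out : Int) : Prop := out = identifierFsm_alt id_str
instance (id_str : String) (out : Int) : Decidable (Spec_identifierFsm id_str out) := by unfold Spec_identifierFsm; infer_instance

-- ===== CLAIM (what is proved, stated in full; the proofs are below) =====
def Claim_equal_identifierFsm : Prop := ∀ (id_str : String), Dom_identifierFsm id_str → Spec_identifierFsm id_str (identifierFsm id_str)

-- ===== LEMMAS AND PROOFS =====

-- state 5 is absorbing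
lemma pvStep_from5 (l : List Int) : l.foldl pvStep 5 = 5 := by
  induction l with
  | nil => rfl
  | cons c cs ih =>
    simp only [List.foldl_cons]
    have : pvStep 5 c = 5 := by
      unfold pvStep
      split_ifs <;> decide
    rw [this, ih]

-- from state 4 the FSM never reaches an accepting state
lemma pvStep_from4 (l : List Int) (s : Int) (hs : s = 4 ∨ s = 5) :
    l.foldl pvStep s = 4 ∨ l.foldl pvStep s = 5 := by
  induction l generalizing s with
  | nil => exact hs
  | cons c cs ih =>
    simp only [List.foldl_cons]
    apply ih
    rcases hs with h | h <;> subst h <;> unfold pvStep <;> split_ifs <;> decide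

-- from any accepting state, acceptance after consuming the rest ↔ pvRest of the rest
lemma pvStep_acc (l : List Char) (s : Int) (hs : s = 1 ∨ s = 2 ∨ s = 3) :
    (if (l.map (fun c => (c.toNat : Int))).foldl pvStep s = 1 ∨
        (l.map (fun c => (c.toNat : Int))).foldl pvStep s = 2 ∨
        (l.map (fun c => (c.toNat : Int))).foldl pvStep s = 3 then (1 : Int) else 0)
      = pvRest l := by
  induction l generalizing s with
  | nil =>
    simp only [List.map_nil, List.foldl_nil, pvRest]
    rcases hs with h | h | h <;> simp [h]
  | cons c cs ih =>
    simp only [List.map_cons, List.foldl_cons, pvRest]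
    by_cases hw : pvIsWord (c.toNat : Int) = true
    · rw [if_pos hw]
      have hw' : ((65 ≤ (c.toNat : Int) ∧ (c.toNat : Int) ≤ 90) ∨
            (95 ≤ (c.toNat : Int) ∧ (c.toNat : Int) ≤ 122)) ∨
          (48 ≤ (c.toNat : Int) ∧ (c.toNat : Int) ≤ 57) := by
        unfold pvIsWord pvIsLetter at hw
        simpa using hw
      have hst : pvStep s (c.toNat : Int) = 2 ∨ pvStep s (c.toNat : Int) = 3 := by
        by_cases hA : (65 ≤ (c.toNat : Int) ∧ (c.toNat : Int) ≤ 90) ∨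
            (95 ≤ (c.toNat : Int) ∧ (c.toNat : Int) ≤ 122)
        · left
          rcases hs with h | h | h <;> subst h <;> unfold pvStep <;> rw [if_pos hA] <;> decide
        · right
          have hd := hw'.resolve_left hA
          rcases hs with h | h | h <;> subst h <;> unfold pvStep <;>
            rw [if_neg hA, if_pos hd] <;> decide
      rcases hst with h2 | h2 <;> simp only [h2] <;> exact ih _ (by simp)
    · rw [if_neg hw]
      unfold pvIsWord pvIsLetter at hw
      simp only [Bool.or_eq_true, decide_eq_true_eq, not_or] at hw
      have h5 : pvStep s (c.toNat : Int) = 5 := by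
        rcases hs with h | h | h <;> subst h <;> unfold pvStep <;> split_ifs <;>
          first | decide | tauto
      simp only [h5, pvStep_from5]
      norm_num

-- ===== VERDICT (by name: the statement is the Claim_ definition above) =====
theorem identifierFsm_spec : Claim_equal_identifierFsm := by
  intro id_str _
  unfold Spec_identifierFsm identifierFsm identifierFsm_alt
  simp only []
  have hlen : ((id_str.toList.length : Int)) = (((id_str.toList.map (fun c => (c.toNat : Int))).length : Int)) := by simp
  rw [hlen, PySem.List.foldl_pyRange_zero_pyGetD' (id_str.toList.map (fun c => (c.toNat : Int))) 0 pvStep 0]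
  cases h : id_str.toList with
  | nil => simp
  | cons c cs =>
      simp only [List.map_cons, List.foldl_cons]
      by_cases hL : pvIsLetter (c.toNat : Int) = true
      · rw [if_pos hL]
        have hL' := hL
        unfold pvIsLetter at hL'
        simp only [decide_eq_true_eq] at hL'
        have h1 : pvStep 0 (c.toNat : Int) = 1 := by
          unfold pvStep; rw [if_pos hL']; rfl
        simp only [h1]
        exact pvStep_acc cs 1 (Or.inl rfl)
      · rw [if_neg hL]
        unfold pvIsLetter at hL
        simp only [decide_eq_true_eq, not_or] at hL
        by_cases hD : (48 ≤ (c.toNat : Int) ∧ (c.toNat : Int) ≤ 57)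
        · have h4 : pvStep 0 (c.toNat : Int) = 4 := by
            unfold pvStep
            rw [if_neg (by tauto), if_pos hD]; rfl
          simp only [h4]
          rcases pvStep_from4 (cs.map (fun c => (c.toNat : Int))) 4 (Or.inl rfl) with h' | h' <;>
            simp only [h'] <;> norm_num
        · have h5 : pvStep 0 (c.toNat : Int) = 5 := by
            unfold pvStep
            rw [if_neg (by tauto), if_neg hD]; rfl
          simp only [h5, pvStep_from5]
          norm_num
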